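-- pv_equiv track=rewrite | github.com/smsxgz/euler_project | problem_116&117/Red_green_blue_tiles.py | Red_green_or_blue_tiles
-- ===== SOURCE A (Python) =====
-- def Red_green_or_blue_tiles(n):
--     l2 = [0, 1]
--     l3 = [0, 0, 1]
--     l4 = [0, 0, 0, 1]
--
--     k = 0
--     while k < n:
--         l2.append(l2[-2] + l2[-1])
--         l3.append(l3[-3] + l3[-1])
--         l4.append(l4[-4] + l4[-1])
--         k += 1
--
--     return l2[-1] + l3[-1] + l4[-1] - 3
-- ===== SOURCE B (Python) =====
-- def Red_green_or_blue_tiles(n):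
--     total = 0
--     for m in (2, 3, 4):
--         term = 1  # C(n - (m-1)*j, j) for j = 0
--         for j in range(1, n // m + 1):
--             num = 1
--             for i in range(1, m + 1):
--                 num *= n - m * j + i
--             den = j
--             for i in range(m - 1):
--                 den *= n - (m - 1) * (j - 1) - i
--             term = term * num // den
--             total += term
--     return total
-- ===== Notes on version B (the rewrite author's own statement) =====
-- stated objective: alternative
-- what changed: Replaces A's three growing-list linear recurrences (lists appended n times and read by negative indices) by a direct combinatorial formula: for each tile size it sums the binomial coefficients C(n-(m-1)j, j) over the number j of colored tiles, updating each term from the previous one by an exact multiply-divide ratio.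
import Mathlib
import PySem

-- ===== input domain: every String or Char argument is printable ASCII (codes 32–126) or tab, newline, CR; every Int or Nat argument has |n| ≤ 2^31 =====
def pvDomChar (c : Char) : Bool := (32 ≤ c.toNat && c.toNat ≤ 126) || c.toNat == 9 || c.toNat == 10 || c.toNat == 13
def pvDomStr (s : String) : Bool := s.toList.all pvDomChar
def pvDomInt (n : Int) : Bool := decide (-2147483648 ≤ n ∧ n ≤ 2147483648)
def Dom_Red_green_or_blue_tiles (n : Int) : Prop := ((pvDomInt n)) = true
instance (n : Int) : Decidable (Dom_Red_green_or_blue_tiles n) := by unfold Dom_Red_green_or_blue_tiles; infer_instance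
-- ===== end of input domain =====

-- B replaces A's three growing-list recurrences by a direct binomial-sum computation: for each
-- tile size m, it sums C(n-(m-1)j, j) over the number j of colored tiles, updating each term from
-- the previous one by an exact multiply-divide ratio; objective: alternative.

-- ===== PORT A =====
-- while k < n: append the recurrence value to each of the three lists (recursion on the remaining iteration count)
def rgbLoop (l2 l3 l4 : List Int) (k n : Int) : List Int × List Int × List Int :=
  if k < n then
    rgbLoop (l2 ++ [PySem.List.pyGetD l2 (-2) 0 + PySem.List.pyGetD l2 (-1) 0])
            (l3 ++ [PySem.List.pyGetD l3 (-3) 0 + PySem.List.pyGetD l3 (-1) 0])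
            (l4 ++ [PySem.List.pyGetD l4 (-4) 0 + PySem.List.pyGetD l4 (-1) 0])
            (k + 1) n
  else (l2, l3, l4)
termination_by (n - k).toNat
decreasing_by omega

def Red_green_or_blue_tiles (n : Int) : Int :=
  let r := rgbLoop [0, 1] [0, 0, 1] [0, 0, 0, 1] 0 n
  PySem.List.pyGetD r.1 (-1) 0 + PySem.List.pyGetD r.2.1 (-1) 0 +
    PySem.List.pyGetD r.2.2 (-1) 0 - 3

-- ===== PORT B =====
-- binomial sum with an exact incremental term: term = term * num // den updates
-- C(n-(m-1)(j-1), j-1) to C(n-(m-1)j, j); num and den are small product loops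
def Red_green_or_blue_tiles_alt (n : Int) : Int :=
  [(2 : Int), 3, 4].foldl
    (fun total m =>
      ((PySem.List.pyRange 1 (PySem.Int.floordiv n m + 1) 1).foldl
        (fun (s : Int × Int) j =>
          let num := (PySem.List.pyRange 1 (m + 1) 1).foldl
            (fun p i => p * (n - m * j + i)) 1
          let den := (PySem.List.pyRange 0 (m - 1) 1).foldl
            (fun p i => p * (n - (m - 1) * (j - 1) - i)) j
          let term := PySem.Int.floordiv (s.1 * num) den
          (term, s.2 + term))
        (1, total)).2)
    0

-- ===== PRECONDITION & SPEC =====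
def Spec_Red_green_or_blue_tiles (n : Int) (out : Int) : Prop := out = Red_green_or_blue_tiles_alt n
instance (n : Int) (out : Int) : Decidable (Spec_Red_green_or_blue_tiles n out) := by unfold Spec_Red_green_or_blue_tiles; infer_instance

-- ===== CLAIM (what is proved, stated in full; the proofs are below) =====
def Claim_equal_Red_green_or_blue_tiles : Prop := ∀ (n : Int), Dom_Red_green_or_blue_tiles n → Spec_Red_green_or_blue_tiles n (Red_green_or_blue_tiles n)

-- ===== LEMMAS AND PROOFS =====

-- the three padded recurrence sequences that A's lists tabulate
def seq2 : ℕ → ℤ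
  | 0 => 0
  | 1 => 1
  | (k + 2) => seq2 k + seq2 (k + 1)

def seq3 : ℕ → ℤ
  | 0 => 0
  | 1 => 0
  | 2 => 1
  | (k + 3) => seq3 k + seq3 (k + 2)

def seq4 : ℕ → ℤ
  | 0 => 0
  | 1 => 0
  | 2 => 0
  | 3 => 1
  | (k + 4) => seq4 k + seq4 (k + 3)

def tab (a : ℕ → ℤ) (L : ℕ) : List Int := (List.range L).map a

-- the binomial sum, including the all-unit-tiles term j = 0
def G (m n : ℕ) : ℕ := ∑ j ∈ Finset.range (n + 1), (n - (m - 1) * j).choose j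

-- pointwise Pascal step for the recurrence of G
lemma G_pointwise (m n i : ℕ) (hm : 2 ≤ m) (h : m ≤ n + 1) (_hi : i ≤ n) :
    (n + 1 - (m - 1) * (i + 1)).choose (i + 1)
      = (n - (m - 1) * (i + 1)).choose (i + 1) + (n + 1 - m - (m - 1) * i).choose i := by
  have hu : (m - 1) * (i + 1) = (m - 1) * i + (m - 1) := by ring
  by_cases hc : (m - 1) * (i + 1) ≤ n
  · have h1 : n + 1 - (m - 1) * (i + 1) = (n - (m - 1) * (i + 1)) + 1 := by omega
    have h2 : n + 1 - m - (m - 1) * i = n - (m - 1) * (i + 1) := by omega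
    rw [h1, h2, Nat.choose_succ_succ, Nat.add_comm]
  · have hi1 : 1 ≤ i := by
      by_contra h0
      have : i = 0 := by omega
      subst this
      simp at hu
      omega
    have e1 : n + 1 - (m - 1) * (i + 1) = 0 := by omega
    have e2 : n - (m - 1) * (i + 1) = 0 := by omega
    have e3 : n + 1 - m - (m - 1) * i = 0 := by omega
    rw [e1, e2, e3, Nat.choose_eq_zero_of_lt (Nat.succ_pos i), Nat.choose_eq_zero_of_lt hi1]

-- G satisfies the same recurrence as A's sequences
lemma G_succ (m n : ℕ) (hm : 2 ≤ m) (h : m ≤ n + 1) :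
    G m (n + 1) = G m n + G m (n + 1 - m) := by
  unfold G
  have ha : ∑ j ∈ Finset.range (n + 1 + 1), (n - (m - 1) * j).choose j
      = ∑ j ∈ Finset.range (n + 1), (n - (m - 1) * j).choose j := by
    rw [Finset.sum_range_succ, Nat.choose_eq_zero_of_lt (by omega), Nat.add_zero]
  have hb : ∑ i ∈ Finset.range (n + 1 - m + 1), (n + 1 - m - (m - 1) * i).choose i
      = ∑ i ∈ Finset.range (n + 1), (n + 1 - m - (m - 1) * i).choose i := by
    apply Finset.sum_subset
    · intro x hx
      rw [Finset.mem_range] at *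
      omega
    · intro x hx hnx
      rw [Finset.mem_range] at hx
      rw [Finset.mem_range, not_lt] at hnx
      exact Nat.choose_eq_zero_of_lt (by omega)
  rw [← ha, hb, Finset.sum_range_succ' _ (n + 1), Finset.sum_range_succ' _ (n + 1)]
  simp only [Nat.mul_zero, Nat.sub_zero, Nat.choose_zero_right]
  have key : ∑ i ∈ Finset.range (n + 1), (n + 1 - (m - 1) * (i + 1)).choose (i + 1)
      = ∑ i ∈ Finset.range (n + 1), (n - (m - 1) * (i + 1)).choose (i + 1)
        + ∑ i ∈ Finset.range (n + 1), (n + 1 - m - (m - 1) * i).choose i := by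
    rw [← Finset.sum_add_distrib]
    refine Finset.sum_congr rfl ?_
    intro i hi
    exact G_pointwise m n i hm h (by rw [Finset.mem_range] at hi; omega)
  omega

-- cutting the sum at n/m only drops vanishing terms
lemma G_split (m n : ℕ) (hm : 0 < m) :
    G m n = 1 + ∑ k ∈ Finset.range (n / m), (n - (m - 1) * (k + 1)).choose (k + 1) := by
  unfold G
  rw [Finset.sum_range_succ' _ n]
  simp only [Nat.mul_zero, Nat.sub_zero, Nat.choose_zero_right]
  have hsub : ∑ k ∈ Finset.range (n / m), (n - (m - 1) * (k + 1)).choose (k + 1)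
      = ∑ k ∈ Finset.range n, (n - (m - 1) * (k + 1)).choose (k + 1) := by
    apply Finset.sum_subset
    · intro x hx
      rw [Finset.mem_range] at *
      have := Nat.div_le_self n m
      omega
    · intro x hx hnx
      rw [Finset.mem_range] at hx
      rw [Finset.mem_range, not_lt] at hnx
      have hlt : n < (x + 1) * m := (Nat.div_lt_iff_lt_mul hm).mp (by omega)
      have hmx : (m - 1) * (x + 1) + (x + 1) = m * (x + 1) := by
        have h1 : (m - 1) * (x + 1) = m * (x + 1) - (x + 1) := Nat.sub_one_mul m (x + 1)
        have h2 : x + 1 ≤ m * (x + 1) := Nat.le_mul_of_pos_left _ hm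
        omega
      have hlt' : n < m * (x + 1) := by rw [Nat.mul_comm] at hlt; exact hlt
      exact Nat.choose_eq_zero_of_lt (by omega)
  rw [hsub]
  omega

lemma seq2_pack (k : ℕ) : seq2 (k + 1) = (G 2 k : ℤ) ∧ seq2 (k + 2) = (G 2 (k + 1) : ℤ) := by
  induction k with
  | zero =>
    constructor <;> norm_num [seq2, G, Finset.sum_range_succ]
  | succ t ih =>
    obtain ⟨h1, h2⟩ := ih
    refine ⟨h2, ?_⟩
    have hG : G 2 (t + 2) = G 2 (t + 1) + G 2 (t + 2 - 2) := G_succ 2 (t + 1) (by omega) (by omega)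
    have hs : seq2 (t + 3) = seq2 (t + 1) + seq2 (t + 2) := rfl
    rw [hs, h1, h2, hG]
    have : t + 2 - 2 = t := by omega
    rw [this]
    push_cast
    ring

lemma seq3_pack (k : ℕ) : seq3 (k + 2) = (G 3 k : ℤ) ∧ seq3 (k + 3) = (G 3 (k + 1) : ℤ)
    ∧ seq3 (k + 4) = (G 3 (k + 2) : ℤ) := by
  induction k with
  | zero =>
    refine ⟨?_, ?_, ?_⟩ <;> norm_num [seq3, G, Finset.sum_range_succ]
  | succ t ih =>
    obtain ⟨h1, h2, h3⟩ := ih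
    refine ⟨h2, h3, ?_⟩
    have hG : G 3 (t + 3) = G 3 (t + 2) + G 3 (t + 3 - 3) := G_succ 3 (t + 2) (by omega) (by omega)
    have hs : seq3 (t + 5) = seq3 (t + 2) + seq3 (t + 4) := rfl
    rw [hs, h1, h3, hG]
    have : t + 3 - 3 = t := by omega
    rw [this]
    push_cast
    ring

lemma seq4_pack (k : ℕ) : seq4 (k + 3) = (G 4 k : ℤ) ∧ seq4 (k + 4) = (G 4 (k + 1) : ℤ)
    ∧ seq4 (k + 5) = (G 4 (k + 2) : ℤ) ∧ seq4 (k + 6) = (G 4 (k + 3) : ℤ) := by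
  induction k with
  | zero =>
    refine ⟨?_, ?_, ?_, ?_⟩ <;> norm_num [seq4, G, Finset.sum_range_succ]
  | succ t ih =>
    obtain ⟨h1, h2, h3, h4⟩ := ih
    refine ⟨h2, h3, h4, ?_⟩
    have hG : G 4 (t + 4) = G 4 (t + 3) + G 4 (t + 4 - 4) := G_succ 4 (t + 3) (by omega) (by omega)
    have hs : seq4 (t + 7) = seq4 (t + 3) + seq4 (t + 6) := rfl
    rw [hs, h1, h4, hG]
    have : t + 4 - 4 = t := by omega
    rw [this]
    push_cast
    ring

lemma tab_length (a : ℕ → ℤ) (L : ℕ) : (tab a L).length = L := by simp [tab]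

lemma tab_getD (a : ℕ → ℤ) (L k : ℕ) (h : 0 < k) (hk : k ≤ L) :
    PySem.List.pyGetD (tab a L) (-(OfNat.ofNat k)) 0 = a (L - k) := by
  rw [PySem.List.pyGetD_neg_ofNat (tab a L) k 0 h (by rw [tab_length]; exact hk)]
  simp [tab]

lemma tab_succ (a : ℕ → ℤ) (L : ℕ) : tab a (L + 1) = tab a L ++ [a L] := by
  simp [tab, List.range_succ]

-- A's loop tabulates the three sequences
lemma rgbLoop_tab (fuel : ℕ) : ∀ (k n : Int), (n - k).toNat = fuel →
    ∀ (L2 L3 L4 : ℕ), 2 ≤ L2 → 3 ≤ L3 → 4 ≤ L4 →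
    rgbLoop (tab seq2 L2) (tab seq3 L3) (tab seq4 L4) k n
      = (tab seq2 (L2 + fuel), tab seq3 (L3 + fuel), tab seq4 (L4 + fuel)) := by
  induction fuel with
  | zero =>
    intro k n hf L2 L3 L4 h2 h3 h4
    rw [rgbLoop, if_neg (by omega)]
    simp
  | succ f ih =>
    intro k n hf L2 L3 L4 h2 h3 h4
    rw [rgbLoop, if_pos (by omega)]
    have e2 : tab seq2 L2 ++ [PySem.List.pyGetD (tab seq2 L2) (-2) 0
        + PySem.List.pyGetD (tab seq2 L2) (-1) 0] = tab seq2 (L2 + 1) := by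
      rw [tab_getD seq2 L2 2 (by omega) h2, tab_getD seq2 L2 1 (by omega) (by omega), tab_succ]
      obtain ⟨t, rfl⟩ : ∃ t, L2 = t + 2 := ⟨L2 - 2, by omega⟩
      have : seq2 (t + 2) = seq2 t + seq2 (t + 1) := rfl
      simp only [Nat.add_sub_cancel, this]
      have ee : t + 2 - 1 = t + 1 := by omega
      rw [ee]
    have e3 : tab seq3 L3 ++ [PySem.List.pyGetD (tab seq3 L3) (-3) 0
        + PySem.List.pyGetD (tab seq3 L3) (-1) 0] = tab seq3 (L3 + 1) := by
      rw [tab_getD seq3 L3 3 (by omega) h3, tab_getD seq3 L3 1 (by omega) (by omega), tab_succ]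
      obtain ⟨t, rfl⟩ : ∃ t, L3 = t + 3 := ⟨L3 - 3, by omega⟩
      have : seq3 (t + 3) = seq3 t + seq3 (t + 2) := rfl
      simp only [Nat.add_sub_cancel, this]
      have ee : t + 3 - 1 = t + 2 := by omega
      rw [ee]
    have e4 : tab seq4 L4 ++ [PySem.List.pyGetD (tab seq4 L4) (-4) 0
        + PySem.List.pyGetD (tab seq4 L4) (-1) 0] = tab seq4 (L4 + 1) := by
      rw [tab_getD seq4 L4 4 (by omega) h4, tab_getD seq4 L4 1 (by omega) (by omega), tab_succ]
      obtain ⟨t, rfl⟩ : ∃ t, L4 = t + 4 := ⟨L4 - 4, by omega⟩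
      have : seq4 (t + 4) = seq4 t + seq4 (t + 3) := rfl
      simp only [Nat.add_sub_cancel, this]
      have ee : t + 4 - 1 = t + 3 := by omega
      rw [ee]
    rw [e2, e3, e4, ih (k + 1) n (by omega) (L2 + 1) (L3 + 1) (L4 + 1) (by omega) (by omega) (by omega)]
    have c2 : L2 + 1 + f = L2 + (f + 1) := by omega
    have c3 : L3 + 1 + f = L3 + (f + 1) := by omega
    have c4 : L4 + 1 + f = L4 + (f + 1) := by omega
    rw [c2, c3, c4]

-- closed form for A's result
lemma A_closed (n : Int) :
    Red_green_or_blue_tiles n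
      = seq2 (n.toNat + 1) + seq3 (n.toNat + 2) + seq4 (n.toNat + 3) - 3 := by
  unfold Red_green_or_blue_tiles
  have i2 : ([0, 1] : List Int) = tab seq2 2 := by simp [tab, List.range_succ, seq2]
  have i3 : ([0, 0, 1] : List Int) = tab seq3 3 := by simp [tab, List.range_succ, seq3]
  have i4 : ([0, 0, 0, 1] : List Int) = tab seq4 4 := by simp [tab, List.range_succ, seq4]
  rw [i4, i3, i2,
    rgbLoop_tab n.toNat 0 n (by omega) 2 3 4 (by omega) (by omega) (by omega)]
  simp only
  rw [tab_getD seq2 (2 + n.toNat) 1 (by omega) (by omega),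
      tab_getD seq3 (3 + n.toNat) 1 (by omega) (by omega),
      tab_getD seq4 (4 + n.toNat) 1 (by omega) (by omega)]
  have d2 : 2 + n.toNat - 1 = n.toNat + 1 := by omega
  have d3 : 3 + n.toNat - 1 = n.toNat + 2 := by omega
  have d4 : 4 + n.toNat - 1 = n.toNat + 3 := by omega
  rw [d2, d3, d4]

def ff (a : ℕ) : ℕ → ℕ
  | 0 => 1
  | (d + 1) => ff a d * (a - d)

lemma ff_eq_zero {a : ℕ} : ∀ {d : ℕ}, a < d → ff a d = 0 := by
  intro d
  induction d with
  | zero => omega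
  | succ t ih =>
    intro h
    by_cases ht : a < t
    · rw [ff, ih ht, Nat.zero_mul]
    · have he : a = t := by omega
      rw [ff, he, Nat.sub_self, Nat.mul_zero]

lemma ff_pos {a d : ℕ} (h : d ≤ a) : 0 < ff a d := by
  induction d with
  | zero => simp [ff]
  | succ t ih =>
    rw [ff]
    exact Nat.mul_pos (ih (by omega)) (by omega)

lemma ff_succ_succ (a d : ℕ) : ff (a + 1) (d + 1) = (a + 1) * ff a d := by
  induction d with
  | zero => simp [ff]
  | succ t ih =>
    have h : a + 1 - (t + 1) = a - t := by omega
    rw [ff, ih, h, ff, Nat.mul_assoc]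

lemma choose_pred_mul (n k : ℕ) (h : 1 ≤ n) : (n - 1).choose k * n = n.choose k * (n - k) := by
  obtain ⟨t, rfl⟩ : ∃ t, n = t + 1 := ⟨n - 1, by omega⟩
  have h1 := Nat.succ_mul_choose_eq t k
  simp only [Nat.succ_eq_add_one] at h1
  have h2 := Nat.choose_succ_right_eq (t + 1) k
  simp only [Nat.add_sub_cancel]
  rw [Nat.mul_comm (t.choose k) (t + 1)]
  omega

lemma FF (j : ℕ) : ∀ (d N : ℕ), (N - d).choose j * ff N d = N.choose j * ff (N - j) d := by
  intro d
  induction d with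
  | zero => simp [ff]
  | succ t ih =>
    intro N
    by_cases hN : t < N
    · have hpred := choose_pred_mul (N - t) j (by omega)
      have hih := ih N
      have e1 : N - (t + 1) = N - t - 1 := by omega
      have e2 : N - t - j = N - j - t := by omega
      rw [ff, ff, e1]
      calc (N - t - 1).choose j * (ff N t * (N - t))
          = ((N - t - 1).choose j * (N - t)) * ff N t := by ring
        _ = ((N - t).choose j * (N - t - j)) * ff N t := by rw [hpred]
        _ = ((N - t).choose j * ff N t) * (N - t - j) := by ring
        _ = (N.choose j * ff (N - j) t) * (N - t - j) := by rw [hih]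
        _ = N.choose j * (ff (N - j) t * (N - j - t)) := by rw [e2]; ring
    · have z1 : ff N (t + 1) = 0 := ff_eq_zero (by omega)
      have z2 : ff (N - j) (t + 1) = 0 := ff_eq_zero (by omega)
      rw [z1, z2, Nat.mul_zero, Nat.mul_zero]

-- exact-ratio step: C(N,J-1) * num = C(N-(M-1),J) * den
lemma step_id (n' M J : ℕ) (hM : 1 ≤ M) (hJ : 1 ≤ J) (h : M * J ≤ n') :
    (n' - (M - 1) * J).choose J * (J * ff (n' - (M - 1) * (J - 1)) (M - 1))
      = (n' - (M - 1) * (J - 1)).choose (J - 1) * ff (n' - M * J + M) M := by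
  obtain ⟨t, rfl⟩ : ∃ t, J = t + 1 := ⟨J - 1, by omega⟩
  have hexp : (M - 1) * (t + 1) = (M - 1) * t + (M - 1) := by ring
  have hMt : M * (t + 1) = M * t + M := by ring
  have hsub1 : (M - 1) * t + t = M * t := by
    have := Nat.sub_one_mul M t
    have h2 : t ≤ M * t := Nat.le_mul_of_pos_left _ (by omega)
    omega
  set N := n' - (M - 1) * t with hNdef
  have hJN : t + 1 ≤ N := by omega
  have hA : n' - (M - 1) * (t + 1) = N - (M - 1) := by omega
  have hB : n' - M * (t + 1) + M = N - t := by omega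
  simp only [Nat.add_sub_cancel]
  rw [hA, hB]
  have hFF := FF (t + 1) (M - 1) N
  have hcsr := Nat.choose_succ_right_eq N t
  have hff1 : ff (N - t) M = (N - t) * ff (N - t - 1) (M - 1) := by
    obtain ⟨a, ha⟩ : ∃ a, N - t = a + 1 := ⟨N - t - 1, by omega⟩
    obtain ⟨d, hd⟩ : ∃ d, M = d + 1 := ⟨M - 1, by omega⟩
    rw [ha, hd, ff_succ_succ]
    simp
  have e3 : N - (t + 1) = N - t - 1 := by omega
  calc (N - (M - 1)).choose (t + 1) * ((t + 1) * ff N (M - 1))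
      = ((N - (M - 1)).choose (t + 1) * ff N (M - 1)) * (t + 1) := by ring
    _ = (N.choose (t + 1) * ff (N - (t + 1)) (M - 1)) * (t + 1) := by rw [hFF]
    _ = (N.choose (t + 1) * (t + 1)) * ff (N - (t + 1)) (M - 1) := by ring
    _ = (N.choose t * (N - t)) * ff (N - (t + 1)) (M - 1) := by rw [hcsr]
    _ = N.choose t * ((N - t) * ff (N - t - 1) (M - 1)) := by rw [e3]; ring
    _ = N.choose t * ff (N - t) M := by rw [hff1]

lemma foldl_mul {α : Type} (g : α → ℤ) : ∀ (l : List α) (a : ℤ),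
    l.foldl (fun p x => p * g x) a = a * (l.map g).prod := by
  intro l
  induction l with
  | nil => intro a; simp
  | cons x xs ih => intro a; simp [List.foldl_cons, ih, mul_assoc]

lemma prod_map_range_int (f : ℕ → ℤ) (q : ℕ) :
    ((List.range q).map f).prod = ∏ k ∈ Finset.range q, f k := by
  induction q with
  | zero => simp
  | succ t ih => rw [List.range_succ, List.map_append, List.prod_append, ih,
      Finset.prod_range_succ]; simp

lemma ff_cast_prod (a : ℕ) : ∀ (d : ℕ), d ≤ a → ((ff a d : ℕ) : ℤ) = ∏ k ∈ Finset.range d, ((a : ℤ) - (k : ℤ)) := by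
  intro d
  induction d with
  | zero => intro _; simp [ff]
  | succ t ih =>
    intro h
    rw [ff, Finset.prod_range_succ, ← ih (by omega)]
    push_cast [Nat.cast_sub (by omega : t ≤ a)]
    ring

-- the num loop computes the falling factorial (n'-MJ+M)(…)(n'-MJ+1)
lemma num_eval (n' M J : ℕ) (jz : ℤ) (hjz : jz = (J : ℤ)) (hM : 1 ≤ M) (hJ : 1 ≤ J)
    (h : M * J ≤ n') :
    (PySem.List.pyRange 1 ((M : ℤ) + 1) 1).foldl
        (fun p i => p * ((n' : ℤ) - (M : ℤ) * jz + i)) 1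
      = ((ff (n' - M * J + M) M : ℕ) : ℤ) := by
  subst hjz
  rw [PySem.List.pyRange_one, List.foldl_map]
  have hlen : (((M : ℤ) + 1) - 1).toNat = M := by omega
  rw [hlen, foldl_mul, prod_map_range_int, one_mul]
  rw [ff_cast_prod _ M (by omega)]
  have hc : ((n' - M * J + M : ℕ) : ℤ) = (n' : ℤ) - (M : ℤ) * (J : ℤ) + M := by
    push_cast [Nat.cast_sub h]
    ring
  rw [← Finset.prod_range_reflect (fun k => (n' : ℤ) - (M : ℤ) * (J : ℤ) + (1 + (k : ℤ))) M]
  refine Finset.prod_congr rfl ?_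
  intro k hk
  rw [Finset.mem_range] at hk
  have hck : ((M - 1 - k : ℕ) : ℤ) = (M : ℤ) - 1 - (k : ℤ) := by omega
  rw [hc, hck]
  ring

-- the den loop computes J * N(N-1)…(N-(M-2)) for N = n'-(M-1)(J-1)
lemma den_eval (n' M J : ℕ) (jz : ℤ) (hjz : jz = (J : ℤ)) (hM : 2 ≤ M) (hJ : 1 ≤ J)
    (h : M * J ≤ n') :
    (PySem.List.pyRange 0 ((M : ℤ) - 1) 1).foldl
        (fun p i => p * ((n' : ℤ) - ((M : ℤ) - 1) * (jz - 1) - i)) (J : ℤ)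
      = ((J * ff (n' - (M - 1) * (J - 1)) (M - 1) : ℕ) : ℤ) := by
  subst hjz
  rw [PySem.List.pyRange_one, List.foldl_map]
  have hlen : (((M : ℤ) - 1) - 0).toNat = M - 1 := by omega
  rw [hlen, foldl_mul, prod_map_range_int]
  have hle1 : (M - 1) * (J - 1) ≤ M * J := by
    calc (M - 1) * (J - 1) ≤ M * (J - 1) := Nat.mul_le_mul_right _ (by omega)
      _ ≤ M * J := Nat.mul_le_mul_left _ (by omega)
  have hMN : M - 1 ≤ n' - (M - 1) * (J - 1) := by
    have e1 : (M - 1) * (J - 1) + (M - 1) = (M - 1) * J := by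
      obtain ⟨v, rfl⟩ : ∃ v, J = v + 1 := ⟨J - 1, by omega⟩
      simp only [Nat.add_sub_cancel]
      ring
    have e2 : (M - 1) * J + J = M * J := by
      have := Nat.sub_one_mul M J
      have h2 : J ≤ M * J := Nat.le_mul_of_pos_left _ (by omega)
      omega
    omega
  have hcM : ((M - 1 : ℕ) : ℤ) = (M : ℤ) - 1 := by omega
  have hcJ : ((J - 1 : ℕ) : ℤ) = (J : ℤ) - 1 := by omega
  have hNc : ((n' - (M - 1) * (J - 1) : ℕ) : ℤ)
      = (n' : ℤ) - ((M : ℤ) - 1) * ((J : ℤ) - 1) := by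
    rw [Nat.cast_sub (le_trans hle1 h), Nat.cast_mul, hcM, hcJ]
  rw [Nat.cast_mul, ff_cast_prod _ (M - 1) hMN, hNc]
  congr 1
  refine Finset.prod_congr rfl ?_
  intro k hk
  ring

lemma B_loop (n' M : ℕ) (total : ℤ) (hM : 2 ≤ M) : ∀ q, q ≤ n' / M →
    (PySem.List.pyRange 1 ((q : ℤ) + 1) 1).foldl
      (fun (s : Int × Int) j =>
        let num := (PySem.List.pyRange 1 ((M : ℤ) + 1) 1).foldl
          (fun p i => p * ((n' : ℤ) - (M : ℤ) * j + i)) 1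
        let den := (PySem.List.pyRange 0 ((M : ℤ) - 1) 1).foldl
          (fun p i => p * ((n' : ℤ) - ((M : ℤ) - 1) * (j - 1) - i)) j
        let term := PySem.Int.floordiv (s.1 * num) den
        (term, s.2 + term))
      (1, total)
    = ((((n' - (M - 1) * q).choose q : ℕ) : ℤ),
       total + ∑ k ∈ Finset.range q, (((n' - (M - 1) * (k + 1)).choose (k + 1) : ℕ) : ℤ)) := by
  intro q
  induction q with
  | zero =>
    intro _
    simp only [Nat.cast_zero, zero_add]
    rw [PySem.List.pyRange_one_eq_nil (le_refl (1 : ℤ))]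
    simp
  | succ t ih =>
    intro hq
    have hcast : (((t + 1 : ℕ) : ℤ)) + 1 = ((t : ℤ) + 1) + 1 := by push_cast; ring
    rw [hcast, PySem.List.pyRange_one_succ_right (by omega : (1:ℤ) ≤ (t : ℤ) + 1),
        List.foldl_append, ih (by omega)]
    simp only [List.foldl_cons, List.foldl_nil]
    have hmul : M * (t + 1) ≤ n' := by
      have := (Nat.le_div_iff_mul_le (show 0 < M by omega)).mp hq
      have h2 : (t + 1) * M = M * (t + 1) := Nat.mul_comm _ _
      omega
    have hnum := num_eval n' M (t + 1) ((t : ℤ) + 1) (by push_cast; ring) (by omega) (by omega) hmul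
    have hden := den_eval n' M (t + 1) ((t : ℤ) + 1) (by push_cast; ring) hM (by omega) hmul
    have hdenc : ((t + 1 : ℕ) : ℤ) = (t : ℤ) + 1 := by push_cast; ring
    rw [hdenc] at hden
    simp only [Nat.add_sub_cancel] at hden
    rw [hnum, hden]
    have hid := step_id n' M (t + 1) (by omega) (by omega) hmul
    simp only [Nat.add_sub_cancel] at hid
    have hffpos : 0 < (t + 1) * ff (n' - (M - 1) * t) (M - 1) := by
      have hsub1 : (M - 1) * t + t = M * t := by
        have := Nat.sub_one_mul M t
        have h2 : t ≤ M * t := Nat.le_mul_of_pos_left _ (by omega)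
        omega
      have hMt : M * (t + 1) = M * t + M := by ring
      apply Nat.mul_pos (by omega)
      apply ff_pos
      omega
    have hflo : PySem.Int.floordiv
        (((n' - (M - 1) * t).choose t : ℕ) * ((ff (n' - M * (t + 1) + M) M : ℕ) : ℤ))
        (((t + 1) * ff (n' - (M - 1) * t) (M - 1) : ℕ) : ℤ)
        = (((n' - (M - 1) * (t + 1)).choose (t + 1) : ℕ) : ℤ) := by
      rw [← Nat.cast_mul, ← hid, Nat.cast_mul, ← Nat.cast_mul]
      rw [show ((n' - (M - 1) * (t + 1)).choose (t + 1) * ((t + 1) * ff (n' - (M - 1) * t) (M - 1)) : ℕ)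
          = (((t + 1) * ff (n' - (M - 1) * t) (M - 1)) * ((n' - (M - 1) * (t + 1)).choose (t + 1)) : ℕ)
        from Nat.mul_comm _ _]
      rw [PySem.Int.floordiv_natCast]
      rw [Nat.mul_div_cancel_left _ hffpos]
    rw [hflo, Finset.sum_range_succ]
    congr 1
    ring

lemma B_inner (n total m : Int) (hm : 2 ≤ m) (hn : 0 ≤ n) :
    ((PySem.List.pyRange 1 (PySem.Int.floordiv n m + 1) 1).foldl
      (fun (s : Int × Int) j =>
        let num := (PySem.List.pyRange 1 (m + 1) 1).foldl
          (fun p i => p * (n - m * j + i)) 1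
        let den := (PySem.List.pyRange 0 (m - 1) 1).foldl
          (fun p i => p * (n - (m - 1) * (j - 1) - i)) j
        let term := PySem.Int.floordiv (s.1 * num) den
        (term, s.2 + term))
      (1, total)).2
    = total + ((G m.toNat n.toNat : ℤ) - 1) := by
  obtain ⟨N, rfl⟩ : ∃ N : ℕ, n = (N : ℤ) := ⟨n.toNat, (Int.toNat_of_nonneg hn).symm⟩
  obtain ⟨M, rfl⟩ : ∃ M : ℕ, m = (M : ℤ) := ⟨m.toNat, (Int.toNat_of_nonneg (by omega)).symm⟩
  have hM : 2 ≤ M := by exact_mod_cast hm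
  rw [PySem.Int.floordiv_natCast N M, B_loop N M total hM (N / M) (le_refl _)]
  rw [Int.toNat_natCast, Int.toNat_natCast, G_split M N (by omega)]
  push_cast
  ring

-- ===== VERDICT (by name: the statement is the Claim_ definition above) =====
theorem Red_green_or_blue_tiles_spec : Claim_equal_Red_green_or_blue_tiles := by
  intro n _
  unfold Spec_Red_green_or_blue_tiles
  by_cases hn : 0 ≤ n
  · unfold Red_green_or_blue_tiles_alt
    simp only [List.foldl_cons, List.foldl_nil]
    rw [B_inner n 0 2 (by omega) hn, B_inner n _ 3 (by omega) hn, B_inner n _ 4 (by omega) hn,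
        A_closed, (seq2_pack n.toNat).1, (seq3_pack n.toNat).1, (seq4_pack n.toNat).1]
    simp only [show Int.toNat 2 = 2 from rfl, show Int.toNat 3 = 3 from rfl,
      show Int.toNat 4 = 4 from rfl]
    ring
  · have hq : ∀ m : ℤ, 0 < m → PySem.Int.floordiv n m + 1 ≤ 1 := by
      intro m hm
      rw [PySem.Int.floordiv_eq_ediv_of_pos hm]
      have h1 : n / m < 0 := Int.ediv_neg_of_neg_of_pos (by omega) hm
      omega
    unfold Red_green_or_blue_tiles_alt
    simp only [List.foldl_cons, List.foldl_nil]
    rw [PySem.List.pyRange_one_eq_nil (hq 2 (by omega)),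
        PySem.List.pyRange_one_eq_nil (hq 3 (by omega)),
        PySem.List.pyRange_one_eq_nil (hq 4 (by omega))]
    simp only [List.foldl_nil]
    rw [A_closed]
    have : n.toNat = 0 := by omega
    rw [this]
    decide
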